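-- pv_equiv track=rewrite | github.com/zhangbaomu/consensus | scripts/infer.py | _central_homopolymer_mask
-- ===== SOURCE A (Python) =====
-- from typing import Any, Dict, List, Mapping, Optional, Sequence, Tuple
--
-- def _central_homopolymer_mask(sequence: str) -> List[bool]:
--     length = len(sequence)
--     if length == 0:
--         return []
--
--     center = (length - 1) // 2
--     target_base = sequence[center]
--
--     left = center
--     while left > 0 and sequence[left - 1] == target_base:
--         left -= 1
--
--     right = center + 1
--     while right < length and sequence[right] == target_base:
--         right += 1
--
--     mask = [False] * length
--     for idx in range(left, right):
--         mask[idx] = True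
--     return mask
-- ===== SOURCE B (Python) =====
-- def _central_homopolymer_mask(sequence):
--     n = len(sequence)
--     if n == 0:
--         return []
--     center = (n - 1) // 2
--     # one forward pass: indices where a maximal run of equal characters starts
--     starts = [i for i in range(n) if i == 0 or sequence[i] != sequence[i - 1]]
--     starts.append(n)  # sentinel end
--     # the run containing the center is [s, e) with s the last start <= center
--     s = max(x for x in starts if x <= center)
--     e = min(x for x in starts if x > center)
--     return [s <= i < e for i in range(n)]
-- ===== Notes on version B (the rewrite author's own statement) =====
-- stated objective: alternative
-- what changed: Replaces the two outward while-loop expansions from the center pivot with a single forward pass collecting maximal-run start indices, then selects the run interval containing the center and builds the mask from that interval.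
import Mathlib
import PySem

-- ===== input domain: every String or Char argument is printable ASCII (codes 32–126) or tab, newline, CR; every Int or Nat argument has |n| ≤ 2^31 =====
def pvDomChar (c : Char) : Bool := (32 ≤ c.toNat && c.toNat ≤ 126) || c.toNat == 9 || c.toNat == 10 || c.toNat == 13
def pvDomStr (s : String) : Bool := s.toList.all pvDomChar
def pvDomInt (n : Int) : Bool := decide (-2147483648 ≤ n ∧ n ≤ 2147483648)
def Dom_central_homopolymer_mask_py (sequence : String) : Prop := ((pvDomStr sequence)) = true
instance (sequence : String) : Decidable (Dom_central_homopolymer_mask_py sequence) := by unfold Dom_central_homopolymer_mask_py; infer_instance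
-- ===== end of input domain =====

-- B replaces A's two outward while-loop expansions from the center by one forward
-- grouping pass (maximal-run start indices) plus selection of the run containing the
-- center (objective: alternative decomposition, same cost).

-- ===== PORT A =====
-- 'while left > 0 and sequence[left-1] == target_base: left -= 1', started at center;
-- the argument l is the current value of 'left' (the l+1 pattern is the test left > 0,
-- cs[l]? is sequence[left-1]).  Exact: indices stay nonnegative throughout in A.
def pvGoLeft (cs : List Char) (t : Char) : Nat → Nat
  | 0 => 0
  | l + 1 => if cs[l]? = some t then pvGoLeft cs t l else l + 1

-- 'while right < length and sequence[right] == target_base: right += 1';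
-- cs[r]? = some t is exactly 'right < length and sequence[right] == target_base'.
theorem pvGetElem?_some_lt {α : Type} {l : List α} {i : Nat} {a : α}
    (h : l[i]? = some a) : i < l.length := by
  rcases List.getElem?_eq_some_iff.mp h with ⟨h', _⟩; exact h'

def pvGoRight (cs : List Char) (t : Char) (r : Nat) : Nat :=
  if h : cs[r]? = some t then pvGoRight cs t (r + 1) else r
termination_by cs.length - r
decreasing_by
  have := pvGetElem?_some_lt h
  omega

-- Literal port of A.  center = (length-1)//2 equals Nat division here since length ≥ 1;
-- the 'none' branch of the match is unreachable (center < length).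
def central_homopolymer_mask_py (sequence : String) : List Bool :=
  let cs := sequence.toList
  let length := cs.length
  if length = 0 then []
  else
    let center := (length - 1) / 2
    match cs[center]? with
    | none => []  -- unreachable: center < length
    | some target_base =>
      let left := pvGoLeft cs target_base center
      let right := pvGoRight cs target_base (center + 1)
      -- mask = [False]*length; for idx in range(left, right): mask[idx] = True
      (List.range' left (right - left)).foldl (fun m idx => m.set idx true)
        (List.replicate length false)

-- ===== PORT B =====
-- Literal port of Source B.  starts = [i for i in range(n) if i == 0 or s[i] != s[i-1]] + [n];
-- s = max(x for x in starts if x <= center), e = min(x for x in starts if x > center)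
-- (PySem.List.max?/min?; the generators are never empty — 0 and n are in starts — so the
-- 'none' fallback is unreachable); mask = [s <= i < e for i in range(n)].
def central_homopolymer_mask_py_alt (sequence : String) : List Bool :=
  let cs := sequence.toList
  let n := cs.length
  if n = 0 then []
  else
    let center := (n - 1) / 2
    let starts := ((List.range n).filter (fun i => i == 0 || cs[i]? != cs[i - 1]?)) ++ [n]
    match PySem.List.max? (starts.filter (fun x => x ≤ center)) (fun x => x),
          PySem.List.min? (starts.filter (fun x => center < x)) (fun x => x) with
    | some s, some e => (List.range n).map (fun i => decide (s ≤ i ∧ i < e))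
    | _, _ => []  -- unreachable

-- ===== PRECONDITION & SPEC =====
def Spec_central_homopolymer_mask_py (sequence : String) (out : List Bool) : Prop := out = central_homopolymer_mask_py_alt sequence
instance (sequence : String) (out : List Bool) : Decidable (Spec_central_homopolymer_mask_py sequence out) := by unfold Spec_central_homopolymer_mask_py; infer_instance

-- ===== CLAIM (what is proved, stated in full; the proofs are below) =====
def Claim_equal_central_homopolymer_mask_py : Prop := ∀ (sequence : String), Dom_central_homopolymer_mask_py sequence → Spec_central_homopolymer_mask_py sequence (central_homopolymer_mask_py sequence)

-- ===== LEMMAS AND PROOFS =====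

-- The maximal homopolymer interval [s, e) around index c; both ports compute it.
def GoodInterval (cs : List Char) (c s e : Nat) : Prop :=
  s ≤ c ∧ c < e ∧ e ≤ cs.length ∧
  (∀ j, s ≤ j → j < e → cs[j]? = cs[c]?) ∧
  (s = 0 ∨ cs[s - 1]? ≠ cs[c]?) ∧
  (e = cs.length ∨ cs[e]? ≠ cs[c]?)

theorem goodInterval_unique {cs : List Char} {c s1 e1 s2 e2 : Nat}
    (h1 : GoodInterval cs c s1 e1) (h2 : GoodInterval cs c s2 e2) :
    s1 = s2 ∧ e1 = e2 := by
  obtain ⟨hs1, hc1, he1, hall1, hsb1, heb1⟩ := h1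
  obtain ⟨hs2, hc2, he2, hall2, hsb2, heb2⟩ := h2
  constructor
  · by_contra hne
    rcases Nat.lt_or_ge s1 s2 with h | h
    · have hz : s2 ≠ 0 := by omega
      rcases hsb2 with h0 | hneq
      · omega
      · exact hneq (hall1 (s2 - 1) (by omega) (by omega))
    · have h' : s2 < s1 := by omega
      have hz : s1 ≠ 0 := by omega
      rcases hsb1 with h0 | hneq
      · omega
      · exact hneq (hall2 (s1 - 1) (by omega) (by omega))
  · by_contra hne
    rcases Nat.lt_or_ge e1 e2 with h | h
    · rcases heb1 with h0 | hneq
      · omega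
      · exact hneq (hall2 e1 (by omega) (by omega))
    · have h' : e2 < e1 := by omega
      rcases heb2 with h0 | hneq
      · omega
      · exact hneq (hall1 e2 (by omega) (by omega))

-- ---- A-side characterisation ----

theorem pvGoLeft_le (cs : List Char) (t : Char) (l : Nat) : pvGoLeft cs t l ≤ l := by
  induction l with
  | zero => simp [pvGoLeft]
  | succ k ih =>
    unfold pvGoLeft
    split
    · omega
    · omega

theorem pvGoLeft_all (cs : List Char) (t : Char) (l : Nat) :
    ∀ j, pvGoLeft cs t l ≤ j → j < l → cs[j]? = some t := by
  induction l with
  | zero => intro j _ h; omega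
  | succ k ih =>
    unfold pvGoLeft
    split
    · intro j h1 h2
      rcases Nat.lt_or_ge j k with h | h
      · exact ih j h1 h
      · have : j = k := by omega
        subst this; assumption
    · intro j h1 h2; omega

theorem pvGoLeft_stop (cs : List Char) (t : Char) (l : Nat) :
    pvGoLeft cs t l = 0 ∨ cs[pvGoLeft cs t l - 1]? ≠ some t := by
  induction l with
  | zero => left; simp [pvGoLeft]
  | succ k ih =>
    unfold pvGoLeft
    split
    · exact ih
    · right; simpa

theorem pvGoRight_le (cs : List Char) (t : Char) (r : Nat) : r ≤ pvGoRight cs t r := by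
  induction r using pvGoRight.induct cs t with
  | case1 r h ih => rw [pvGoRight]; simp only [h, dif_pos]; omega
  | case2 r h => rw [pvGoRight]; simp [h]

theorem pvGoRight_le_length (cs : List Char) (t : Char) (r : Nat) (hr : r ≤ cs.length) :
    pvGoRight cs t r ≤ cs.length := by
  induction r using pvGoRight.induct cs t with
  | case1 r h ih =>
    rw [pvGoRight]; simp only [h, dif_pos]
    exact ih (by have := pvGetElem?_some_lt h; omega)
  | case2 r h => rw [pvGoRight]; simpa [h] using hr

theorem pvGoRight_all (cs : List Char) (t : Char) (r : Nat) :
    ∀ j, r ≤ j → j < pvGoRight cs t r → cs[j]? = some t := by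
  induction r using pvGoRight.induct cs t with
  | case1 r h ih =>
    intro j h1 h2
    rw [pvGoRight] at h2; simp only [h, dif_pos] at h2
    rcases Nat.lt_or_ge r j with h' | h'
    · exact ih j (by omega) h2
    · have : j = r := by omega
      subst this; assumption
  | case2 r h =>
    intro j h1 h2
    rw [pvGoRight] at h2; simp only [h, dif_neg, not_false_iff] at h2
    omega

theorem pvGoRight_stop (cs : List Char) (t : Char) (r : Nat) :
    cs[pvGoRight cs t r]? ≠ some t := by
  induction r using pvGoRight.induct cs t with
  | case1 r h ih => rw [pvGoRight]; simp only [h, dif_pos]; exact ih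
  | case2 r h => rw [pvGoRight]; simp only [h, dif_neg, not_false_iff]; exact h

theorem portA_good (cs : List Char) (t : Char) (c : Nat) (hc : cs[c]? = some t) :
    GoodInterval cs c (pvGoLeft cs t c) (pvGoRight cs t (c + 1)) := by
  have hcl : c < cs.length := pvGetElem?_some_lt hc
  refine ⟨pvGoLeft_le cs t c, ?_, pvGoRight_le_length cs t (c + 1) (by omega), ?_, ?_, ?_⟩
  · have := pvGoRight_le cs t (c + 1); omega
  · intro j h1 h2
    rw [hc]
    rcases Nat.lt_or_ge j c with h | h
    · exact pvGoLeft_all cs t c j h1 h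
    · rcases Nat.lt_or_ge c j with h' | h'
      · exact pvGoRight_all cs t (c + 1) j (by omega) h2
      · have : j = c := by omega
        subst this; exact hc
  · rw [hc]; exact pvGoLeft_stop cs t c
  · rw [hc]; right; exact pvGoRight_stop cs t (c + 1)

-- The mask loop: pointwise value of the foldl of sets over range' s k.
theorem foldl_set_get (k : Nat) : ∀ (s : Nat) (m : List Bool) (i : Nat),
    ((List.range' s k).foldl (fun m idx => m.set idx true) m)[i]? =
      if s ≤ i ∧ i < s + k then (if i < m.length then some true else none) else m[i]? := by
  induction k with
  | zero =>
    intro s m i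
    simp only [List.range', List.foldl]
    split
    · omega
    · rfl
  | succ k ih =>
    intro s m i
    rw [List.range'_succ]
    simp only [List.foldl]
    rw [ih (s + 1) (m.set s true) i]
    simp only [List.length_set]
    by_cases h : i = s
    · subst h
      rw [if_neg (by omega : ¬ (i + 1 ≤ i ∧ i < i + 1 + k)),
          if_pos (by omega : i ≤ i ∧ i < i + (k + 1))]
      by_cases hl : i < m.length
      · rw [if_pos hl, List.getElem?_set_self (by omega)]
      · rw [if_neg hl, List.getElem?_eq_none (by simp; omega)]
    · rw [List.getElem?_set_ne (fun he => h he.symm)]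
      by_cases hc : s ≤ i ∧ i < s + (k + 1)
      · rw [if_pos hc, if_pos (show s + 1 ≤ i ∧ i < s + 1 + k by omega)]
      · rw [if_neg hc, if_neg (show ¬(s + 1 ≤ i ∧ i < s + 1 + k) by omega)]

theorem mask_eq (n s e : Nat) (hs : s ≤ e) (he : e ≤ n) :
    (List.range' s (e - s)).foldl (fun m idx => m.set idx true) (List.replicate n false)
      = (List.range n).map (fun i => decide (s ≤ i ∧ i < e)) := by
  apply List.ext_getElem?
  intro i
  rw [foldl_set_get]
  simp only [List.length_replicate]
  rcases Nat.lt_or_ge i n with h | h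
  · rw [List.getElem?_map, List.getElem?_range h, Option.map_some]
    by_cases hc : s ≤ i ∧ i < e
    · rw [if_pos (by omega : s ≤ i ∧ i < s + (e - s)), if_pos h]
      simp [hc]
    · rw [if_neg (by omega : ¬(s ≤ i ∧ i < s + (e - s)))]
      rw [List.getElem?_replicate, if_pos h]
      simp [hc]
  · rw [if_neg (by omega : ¬(s ≤ i ∧ i < s + (e - s)))]
    rw [List.getElem?_map]
    rw [List.getElem?_eq_none (by simpa using h), List.getElem?_eq_none (by simpa using h)]
    rfl

-- ---- B-side characterisation ----

-- membership in B's 'starts' list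
theorem mem_starts (cs : List Char) (x : Nat) :
    x ∈ ((List.range cs.length).filter (fun i => i == 0 || cs[i]? != cs[i - 1]?)) ++ [cs.length]
      ↔ (x < cs.length ∧ (x = 0 ∨ cs[x]? ≠ cs[x - 1]?)) ∨ x = cs.length := by
  simp [List.mem_filter, List.mem_range, or_comm]

-- chains of equal neighbours propagate equality (downwards to b)
theorem chain_down (cs : List Char) (a b : Nat)
    (h : ∀ x, a < x → x ≤ b → cs[x]? = cs[x - 1]?) :
    ∀ k j, j + k = b → a ≤ j → cs[j]? = cs[b]? := by
  intro k
  induction k with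
  | zero => intro j hj _; have : j = b := by omega
            subst this; rfl
  | succ m ih =>
    intro j hj ha
    have h1 : cs[j + 1]? = cs[j]? := by
      have := h (j + 1) (by omega) (by omega)
      simpa using this
    rw [← h1]
    exact ih (j + 1) (by omega) (by omega)

theorem portB_good (cs : List Char) (c s e : Nat) (hc : c < cs.length)
    (hmax : PySem.List.max?
        ((((List.range cs.length).filter (fun i => i == 0 || cs[i]? != cs[i - 1]?)) ++ [cs.length]).filter
          (fun x => x ≤ c)) (fun x => x) = some s)
    (hmin : PySem.List.min?
        ((((List.range cs.length).filter (fun i => i == 0 || cs[i]? != cs[i - 1]?)) ++ [cs.length]).filter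
          (fun x => x > c)) (fun x => x) = some e) :
    GoodInterval cs c s e := by
  set starts := ((List.range cs.length).filter (fun i => i == 0 || cs[i]? != cs[i - 1]?)) ++ [cs.length] with hstarts
  have hsmem' := PySem.List.max?_mem hmax
  have hemem' := PySem.List.min?_mem hmin
  have hsmem : s ∈ starts ∧ s ≤ c := by
    have := List.mem_filter.mp hsmem'; simpa using this
  have hemem : e ∈ starts ∧ c < e := by
    have := List.mem_filter.mp hemem'; simpa using this
  have hsmax : ∀ x ∈ starts, x ≤ c → x ≤ s := by
    intro x hx hxc
    have : x ∈ starts.filter (fun x => x ≤ c) := List.mem_filter.mpr ⟨hx, by simpa using hxc⟩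
    exact PySem.List.max?_isMax hmax x this
  have hemin : ∀ x ∈ starts, c < x → e ≤ x := by
    intro x hx hxc
    have : x ∈ starts.filter (fun x => x > c) := List.mem_filter.mpr ⟨hx, by simpa using hxc⟩
    exact PySem.List.min?_isMin hmin x this
  have he_len : e ≤ cs.length := by
    rcases (mem_starts cs e).mp hemem.1 with h | h
    · omega
    · omega
  -- no start strictly inside (s, e): neighbours are equal there
  have hinterior : ∀ x, s < x → x < e → cs[x]? = cs[x - 1]? := by
    intro x h1 h2
    by_contra hne
    have hxlen : x < cs.length := by omega
    have hx : x ∈ starts := (mem_starts cs x).mpr (Or.inl ⟨hxlen, Or.inr hne⟩)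
    by_cases h : x ≤ c
    · have := hsmax x hx h; omega
    · have := hemin x hx (by omega); omega
  have hall : ∀ j, s ≤ j → j < e → cs[j]? = cs[c]? := by
    intro j h1 h2
    by_cases h : j ≤ c
    · exact chain_down cs s c (fun x hx1 hx2 => hinterior x hx1 (by omega)) (c - j) j
        (by omega) h1
    · -- j > c : chain from c up to j, i.e. cs[c]? = cs[j]? reversed
      have := chain_down cs c j (fun x hx1 hx2 => hinterior x (by omega) (by omega)) (j - c) c
        (by omega) (le_refl c)
      exact this.symm
  refine ⟨hsmem.2, hemem.2, he_len, hall, ?_, ?_⟩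
  · -- left boundary
    rcases Nat.decEq s 0 with h | h
    · right
      rcases (mem_starts cs s).mp hsmem.1 with ⟨hlt, hst⟩ | hlen
      · rcases hst with h0 | hne
        · omega
        · have hs_eq : cs[s]? = cs[c]? := hall s (le_refl s) (by omega)
          intro hcontra
          exact hne (by rw [hs_eq, hcontra])
      · omega
    · left; exact h
  · -- right boundary
    rcases Nat.decEq e cs.length with h | h
    · right
      rcases (mem_starts cs e).mp hemem.1 with ⟨hlt, hst⟩ | hlen
      · rcases hst with h0 | hne
        · omega
        · have he_eq : cs[e - 1]? = cs[c]? := hall (e - 1) (by omega) (by omega)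
          rw [← he_eq]; exact hne
      · omega
    · left; exact h

-- ===== VERDICT (by name: the statement is the Claim_ definition above) =====
theorem central_homopolymer_mask_py_spec : Claim_equal_central_homopolymer_mask_py := by
  intro seq _
  unfold Spec_central_homopolymer_mask_py
  unfold central_homopolymer_mask_py central_homopolymer_mask_py_alt
  simp only []
  set cs := seq.toList with hcs
  by_cases hn : cs.length = 0
  · simp [hn]
  · rw [if_neg hn, if_neg hn]
    have hc : (cs.length - 1) / 2 < cs.length := by omega
    set c := (cs.length - 1) / 2 with hcdef
    set starts := ((List.range cs.length).filter (fun i => i == 0 || cs[i]? != cs[i - 1]?)) ++ [cs.length] with hst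
    have h0 : (0 : Nat) ∈ starts.filter (fun x => x ≤ c) := by
      apply List.mem_filter.mpr
      exact ⟨(mem_starts cs 0).mpr (Or.inl ⟨by omega, Or.inl rfl⟩), by simp⟩
    have hnm : cs.length ∈ starts.filter (fun x => x > c) := by
      apply List.mem_filter.mpr
      refine ⟨(mem_starts cs cs.length).mpr (Or.inr rfl), ?_⟩
      simp only [decide_eq_true_eq]
      omega
    obtain ⟨s, hmaxv⟩ : ∃ s, PySem.List.max? (starts.filter (fun x => x ≤ c)) (fun x => x) = some s := by
      cases hv : PySem.List.max? (starts.filter (fun x => x ≤ c)) (fun x => x) with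
      | none =>
        have := (PySem.List.max?_eq_none_iff _ _).mp hv
        rw [this] at h0; simp at h0
      | some s => exact ⟨s, rfl⟩
    obtain ⟨e, hminv⟩ : ∃ e, PySem.List.min? (starts.filter (fun x => x > c)) (fun x => x) = some e := by
      cases hv : PySem.List.min? (starts.filter (fun x => x > c)) (fun x => x) with
      | none =>
        have := (PySem.List.min?_eq_none_iff _ _).mp hv
        rw [this] at hnm; simp at hnm
      | some e => exact ⟨e, rfl⟩
    have hA := portA_good cs cs[c] c (List.getElem?_eq_getElem hc)
    have hB := portB_good cs c s e hc hmaxv hminv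
    obtain ⟨hse, hee⟩ := goodInterval_unique hA hB
    rw [List.getElem?_eq_getElem hc, hmaxv, hminv]
    show (List.range' (pvGoLeft cs cs[c] c) (pvGoRight cs cs[c] (c + 1) - pvGoLeft cs cs[c] c)).foldl
          (fun m idx => m.set idx true) (List.replicate cs.length false)
        = (List.range cs.length).map (fun i => decide (s ≤ i ∧ i < e))
    rw [mask_eq cs.length (pvGoLeft cs cs[c] c) (pvGoRight cs cs[c] (c + 1))
          (by have h1 := hA.1; have h2 := hA.2.1; omega) hA.2.2.1]
    rw [hse, hee]
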